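-- pv_equiv track=rewrite | github.com/Trashcan-Gaming/connectFour | ConnectFour.py | inputToNumber
-- ===== SOURCE A (Python) =====
-- def inputToNumber(selection):
--     result = 0;
--     for i in selection:
--         if i == 'a':
--             result = result-1
--         if i == 'd':
--             result = result+1
--     return result;
-- ===== SOURCE B (Python) =====
-- def inputToNumber(selection):
--     if len(selection) == 0:
--         return 0
--     if len(selection) == 1:
--         if selection == 'd':
--             return 1
--         if selection == 'a':
--             return -1
--         return 0
--     mid = len(selection) // 2
--     return inputToNumber(selection[:mid]) + inputToNumber(selection[mid:])
-- ===== Notes on version B (the rewrite author's own statement) =====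
-- stated objective: alternative
-- what changed: Replaces A's linear accumulating loop with a divide-and-conquer recursion: split the string at the midpoint, recursively compute the delta of each half and add them, with length-0/1 base cases; correct because the per-character deltas sum associatively.
import Mathlib
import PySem

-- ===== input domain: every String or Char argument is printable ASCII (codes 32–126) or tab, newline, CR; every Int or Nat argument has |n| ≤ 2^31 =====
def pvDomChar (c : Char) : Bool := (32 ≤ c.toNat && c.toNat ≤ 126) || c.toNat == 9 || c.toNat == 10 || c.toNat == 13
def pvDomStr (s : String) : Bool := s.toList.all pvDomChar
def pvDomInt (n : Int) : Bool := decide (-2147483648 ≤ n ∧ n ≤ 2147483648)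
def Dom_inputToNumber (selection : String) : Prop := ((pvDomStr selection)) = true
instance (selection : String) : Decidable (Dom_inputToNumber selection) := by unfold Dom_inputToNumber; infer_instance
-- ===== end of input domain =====

-- B replaces A's linear accumulating loop by a midpoint divide-and-conquer recursion (deltas sum associatively); alternative structure, same O(n) work.

-- ===== PORT A =====
def inputToNumber (selection : String) : Int :=
  selection.toList.foldl
    (fun result i =>
      let result := if i == 'a' then result - 1 else result
      if i == 'd' then result + 1 else result)
    0

-- ===== PORT B =====
-- Source B recurses on the string with slices selection[:mid] / selection[mid:];
-- ported step for step over the character list (take/drop = those slices).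
def inputToNumberAltGo (l : List Char) : Int :=
  if l.length = 0 then 0
  else if l.length = 1 then
    if l = ['d'] then 1
    else if l = ['a'] then -1
    else 0
  else
    let mid := l.length / 2
    inputToNumberAltGo (l.take mid) + inputToNumberAltGo (l.drop mid)
termination_by l.length
decreasing_by
  · simp only [List.length_take]; omega
  · simp only [List.length_drop]; omega

def inputToNumber_alt (selection : String) : Int :=
  inputToNumberAltGo selection.toList

-- ===== PRECONDITION & SPEC =====
def Spec_inputToNumber (selection : String) (out : Int) : Prop := out = inputToNumber_alt selection
instance (selection : String) (out : Int) : Decidable (Spec_inputToNumber selection out) := by unfold Spec_inputToNumber; infer_instance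

-- ===== CLAIM (what is proved, stated in full; the proofs are below) =====
def Claim_equal_inputToNumber : Prop := ∀ (selection : String), Dom_inputToNumber selection → Spec_inputToNumber selection (inputToNumber selection)

-- ===== LEMMAS AND PROOFS =====

-- A's fold computes acc + #d − #a.
theorem foldl_ad (l : List Char) (acc : Int) :
    l.foldl
      (fun result i =>
        let result := if i == 'a' then result - 1 else result
        if i == 'd' then result + 1 else result)
      acc = acc + (l.count 'd' : Int) - (l.count 'a' : Int) := by
  induction l generalizing acc with
  | nil => simp
  | cons x t ih =>
    simp only [List.foldl_cons, ih]
    by_cases ha : x = 'a' <;> by_cases hd : x = 'd' <;>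
      simp_all <;> omega

-- B's divide-and-conquer also computes #d − #a.
theorem altGo_eq (l : List Char) :
    inputToNumberAltGo l = (l.count 'd' : Int) - (l.count 'a' : Int) := by
  induction l using inputToNumberAltGo.induct with
  | case1 l h0 =>
    rw [List.length_eq_zero_iff] at h0
    subst h0; simp [inputToNumberAltGo]
  | case2 h0 h1 => simp [inputToNumberAltGo]
  | case3 h0 h1 h2 => simp [inputToNumberAltGo]
  | case4 l h0 h1 hd ha =>
    obtain ⟨x, hx⟩ := List.length_eq_one_iff.mp h1
    subst hx
    rw [inputToNumberAltGo]
    simp_all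
  | case5 l h0 h1 mid ih1 ih2 =>
    rw [inputToNumberAltGo]
    simp only [if_neg h0, if_neg h1]
    rw [ih1, ih2]
    have hcd := List.count_append (l₁ := l.take (l.length / 2)) (l₂ := l.drop (l.length / 2)) (a := 'd')
    have hca := List.count_append (l₁ := l.take (l.length / 2)) (l₂ := l.drop (l.length / 2)) (a := 'a')
    rw [List.take_append_drop] at hcd hca
    push_cast [hcd, hca]
    ring

-- ===== VERDICT (by name: the statement is the Claim_ definition above) =====
theorem inputToNumber_spec : Claim_equal_inputToNumber := by
  intro s _
  unfold Spec_inputToNumber inputToNumber inputToNumber_alt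
  rw [foldl_ad, altGo_eq]
  ring
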